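-- pv_equiv track=rewrite | github.com/waverleycz/pokerovyslovnik | scrape_poker_terms.py | organize_by_alphabet
-- ===== SOURCE A (Python) =====
-- def organize_by_alphabet(terms):
--     """Organize terms alphabetically"""
--     alphabetical = {}
--
--     for term, definition in terms.items():
--         # Get the first letter of the term
--         first_letter = term[0].upper()
--
--         # Initialize the list for this letter if it doesn't exist
--         if first_letter not in alphabetical:
--             alphabetical[first_letter] = []
--
--         # Add the term and definition to the appropriate letter
--         alphabetical[first_letter].append({
--             "term": term,
--             "definition": definition
--         })
--
--     # Sort terms within each letter
--     for letter in alphabetical: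
--         alphabetical[letter] = sorted(alphabetical[letter], key=lambda x: x["term"].lower())
--
--     return alphabetical
-- ===== SOURCE B (Python) =====
-- def organize_by_alphabet(terms):
--     """Organize terms alphabetically: sort all items once globally (stable, by
--     term.lower()), then a single grouping pass; the per-bucket sorts disappear.
--     Keys are pre-seeded in first-appearance order, matching the original."""
--     result = {term[0].upper(): [] for term in terms}
--     for term, definition in sorted(terms.items(), key=lambda kv: kv[0].lower()):
--         result[term[0].upper()].append({"term": term, "definition": definition})
--     return result
-- ===== Notes on version B (the rewrite author's own statement) =====
-- stated objective: simpler
-- what changed: A groups first and then sorts every bucket separately; B sorts the items once globally (stable, by term.lower()) and does a single grouping pass with pre-seeded keys, so the per-bucket sorts disappear.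
import Mathlib
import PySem

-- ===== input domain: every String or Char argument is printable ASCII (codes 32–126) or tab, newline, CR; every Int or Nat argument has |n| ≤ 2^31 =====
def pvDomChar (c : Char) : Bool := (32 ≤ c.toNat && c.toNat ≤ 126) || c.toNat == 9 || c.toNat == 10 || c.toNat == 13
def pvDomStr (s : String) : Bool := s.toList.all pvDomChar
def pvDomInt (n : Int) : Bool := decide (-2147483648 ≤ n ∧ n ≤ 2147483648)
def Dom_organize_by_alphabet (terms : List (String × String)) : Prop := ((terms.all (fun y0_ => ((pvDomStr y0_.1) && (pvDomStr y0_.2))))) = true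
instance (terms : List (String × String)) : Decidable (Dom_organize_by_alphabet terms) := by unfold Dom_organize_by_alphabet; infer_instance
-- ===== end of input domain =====

-- B sorts all the items once (stable, by term.lower()) and groups them in a single pass,
-- replacing A's group-then-sort-each-bucket; equivalence is proved on the return value only.

-- term[0].upper(): Python's s[0] is a one-character string; exact where term ≠ "" (Pre_).
def pvFirstLetter (t : String) : String :=
  PySem.Str.upper (String.ofList (match PySem.Str.pyGet? t 0 with
    | some c => [c]
    | none => []))

-- ===== PORT A =====
def organize_by_alphabet (terms : List (String × String)) : List (String × List (List (String × String))) :=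
  let alphabetical := terms.foldl (fun d p =>
      let fl := pvFirstLetter p.1
      let d' := if d.contains fl then d else d.insert fl ([] : List (List (String × String)))
      -- alphabetical[fl].append({...}): key fl is present here, so modify with default [] is exact
      d'.modify fl [] (fun l => l ++ [[("term", p.1), ("definition", p.2)]])) PySem.Dict.empty
  -- for letter in alphabetical: alphabetical[letter] = sorted(..., key=lambda x: x["term"].lower())
  -- (x["term"] always present, so the dict lookup with default "" is exact)
  alphabetical.items.map (fun kv =>
    (kv.1, PySem.List.sorted kv.2 (fun x => PySem.Str.lower ((PySem.Dict.mk x).getD "term" "")) false))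

-- ===== PORT B =====
def organize_by_alphabet_alt (terms : List (String × String)) : List (String × List (List (String × String))) :=
  -- result = {term[0].upper(): [] for term in terms}
  let result := terms.foldl (fun d p =>
      d.insert (pvFirstLetter p.1) ([] : List (List (String × String)))) PySem.Dict.empty
  -- for term, definition in sorted(terms.items(), key=lambda kv: kv[0].lower()):
  let items := PySem.List.sorted terms (fun kv => PySem.Str.lower kv.1) false
  -- result[fl].append({...}): fl is always a key of result, so modify with default [] is exact
  (items.foldl (fun d p =>
      d.modify (pvFirstLetter p.1) [] (fun l => l ++ [[("term", p.1), ("definition", p.2)]])) result).items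

-- ===== PRECONDITION & SPEC =====
-- Pre_ excludes inputs in which some term key has length 0, where the Python A (and B) raise IndexError at term[0].
def Pre_organize_by_alphabet (terms : List (String × String)) : Prop :=
  ∀ p ∈ terms, p.1 ≠ ""
instance (terms : List (String × String)) : Decidable (Pre_organize_by_alphabet terms) := by
  unfold Pre_organize_by_alphabet; infer_instance
def pvWitness_organize_by_alphabet : (List (String × String)) :=
  [("Ace", "the highest card"), ("bluff", "a deceptive bet"), ("All-in", "betting everything")]

def Spec_organize_by_alphabet (terms : List (String × String)) (out : List (String × List (List (String × String)))) : Prop := out = organize_by_alphabet_alt terms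
instance (terms : List (String × String)) (out : List (String × List (List (String × String)))) : Decidable (Spec_organize_by_alphabet terms out) := by unfold Spec_organize_by_alphabet; infer_instance

-- ===== CLAIM (what is proved, stated in full; the proofs are below) =====
def Claim_equal_organize_by_alphabet : Prop := ∀ (terms : List (String × String)), Dom_organize_by_alphabet terms → Pre_organize_by_alphabet terms → Spec_organize_by_alphabet terms (organize_by_alphabet terms)

-- ===== LEMMAS AND PROOFS =====

-- abbreviations used only by the proofs
def pvE (p : String × String) : List (String × String) := [("term", p.1), ("definition", p.2)]
def pvK1 (p : String × String) : String := PySem.Str.lower p.1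
def pvK2 (x : List (String × String)) : String := PySem.Str.lower ((PySem.Dict.mk x).getD "term" "")
def pvStepG (d : PySem.Dict String (List (List (String × String)))) (p : String × String) :
    PySem.Dict String (List (List (String × String))) :=
  d.modify (pvFirstLetter p.1) [] (fun l => l ++ [pvE p])

-- A's loop body (ensure-key-then-append) is the single modify of pvStepG
lemma stepA_eq (d : PySem.Dict String (List (List (String × String)))) (p : String × String) :
    ((if d.contains (pvFirstLetter p.1) then d
      else d.insert (pvFirstLetter p.1) ([] : List (List (String × String)))).modify
        (pvFirstLetter p.1) [] (fun l => l ++ [[("term", p.1), ("definition", p.2)]]))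
      = pvStepG d p := by
  by_cases h : d.contains (pvFirstLetter p.1)
  · simp [h, pvStepG, pvE]
  · simp only [Bool.not_eq_true] at h
    simp [h, pvStepG, pvE, PySem.Dict.modify, PySem.Dict.getD_insert_self,
      PySem.Dict.getD_of_not_contains _ _ h, PySem.Dict.insert_insert_self]

lemma foldA_eq (l : List (String × String)) (d : PySem.Dict String (List (List (String × String)))) :
    l.foldl (fun d p =>
      let fl := pvFirstLetter p.1
      let d' := if d.contains fl then d else d.insert fl ([] : List (List (String × String)))
      d'.modify fl [] (fun l => l ++ [[("term", p.1), ("definition", p.2)]])) d = l.foldl pvStepG d := by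
  induction l generalizing d with
  | nil => rfl
  | cons p t ih =>
    simp only [List.foldl_cons]
    rw [ih]
    congr 1
    exact stepA_eq d p

lemma portA_eq (terms : List (String × String)) :
    organize_by_alphabet terms =
      (terms.foldl pvStepG PySem.Dict.empty).items.map
        (fun kv => (kv.1, PySem.List.sorted kv.2 pvK2 false)) := by
  unfold organize_by_alphabet
  rw [foldA_eq]
  rfl

lemma portB_eq (terms : List (String × String)) :
    organize_by_alphabet_alt terms =
      ((PySem.List.sorted terms pvK1 false).foldl pvStepG
        (terms.foldl (fun d p => d.insert (pvFirstLetter p.1) ([] : List (List (String × String))))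
          PySem.Dict.empty)).items := rfl

-- the grouping fold, characterised
lemma getD_foldG (l : List (String × String)) (d : PySem.Dict String (List (List (String × String)))) (c : String) :
    (l.foldl pvStepG d).getD c [] = d.getD c [] ++ (l.filter (fun p => pvFirstLetter p.1 == c)).map pvE := by
  have h1 : l.foldl pvStepG d
      = (l.map (fun p => (pvFirstLetter p.1, pvE p))).foldl
          (fun d q => d.modify q.1 [] (fun x => x ++ [q.2])) d := by
    rw [List.foldl_map]; rfl
  rw [h1, PySem.Dict.getD_foldl_modify_append, List.filter_map, List.map_map]
  rfl

lemma keys_foldG (l : List (String × String)) (d : PySem.Dict String (List (List (String × String)))) :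
    (l.foldl pvStepG d).keys = PySem.Set.update d.keys (l.map (fun p => pvFirstLetter p.1)) :=
  PySem.Dict.keys_foldl_modify_key l (fun p => pvFirstLetter p.1) [] (fun _ p => fun l => l ++ [pvE p]) d

lemma nodup_keys_foldG (l : List (String × String)) (d : PySem.Dict String (List (List (String × String))))
    (h : d.keys.Nodup) : (l.foldl pvStepG d).keys.Nodup :=
  PySem.Dict.nodup_keys_foldl_modify_key l (fun p => pvFirstLetter p.1) [] (fun _ p => fun l => l ++ [pvE p]) d h

-- the seeding fold of B
lemma getD_seed (l : List (String × String)) (d : PySem.Dict String (List (List (String × String)))) (c : String)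
    (h : d.getD c [] = []) :
    (l.foldl (fun d p => d.insert (pvFirstLetter p.1) ([] : List (List (String × String)))) d).getD c [] = [] := by
  induction l generalizing d with
  | nil => simpa using h
  | cons p t ih =>
    simp only [List.foldl_cons]
    exact ih _ (by rw [PySem.Dict.getD_insert]; split <;> simp [h])

-- stable insertion sort commutes with map
lemma insertBy_map {α β : Type} (e : α → β) (b : α → α → Bool) (b' : β → β → Bool)
    (h : ∀ x y, b' (e x) (e y) = b x y) (x : α) (ys : List α) :
    (PySem.List.insertBy b x ys).map e = PySem.List.insertBy b' (e x) (ys.map e) := by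
  induction ys with
  | nil => simp [PySem.List.insertBy]
  | cons y t ih =>
    simp only [PySem.List.insertBy, List.map_cons, h]
    by_cases hb : b x y <;> simp [hb, ih]

lemma foldl_insertBy_map {α β : Type} (e : α → β) (b : α → α → Bool) (b' : β → β → Bool)
    (h : ∀ x y, b' (e x) (e y) = b x y) (l acc : List α) :
    (l.map e).foldl (fun a x => PySem.List.insertBy b' x a) (acc.map e)
      = (l.foldl (fun a x => PySem.List.insertBy b x a) acc).map e := by
  induction l generalizing acc with
  | nil => rfl
  | cons p t ih =>
    simp only [List.map_cons, List.foldl_cons]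
    rw [← insertBy_map e b b' h, ih]

lemma sorted_map (l : List (String × String)) :
    PySem.List.sorted (l.map pvE) pvK2 false = (PySem.List.sorted l (fun p => pvK2 (pvE p)) false).map pvE := by
  rw [PySem.List.sorted_eq_foldl_insertBy, PySem.List.sorted_eq_foldl_insertBy]
  exact foldl_insertBy_map pvE _ _ (fun x y => rfl) l []

lemma k2_e : (fun p : String × String => pvK2 (pvE p)) = pvK1 := by
  funext p
  simp [pvK2, pvE, pvK1, PySem.Dict.getD_eq_get?_getD, PySem.Dict.get?_mk_cons]

-- stable insertion sort commutes with filter (on a sorted accumulator)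
lemma insertBy_front {α : Type} (b : α → α → Bool) (x : α) (l : List α)
    (h : ∀ z ∈ l, b x z = true) : PySem.List.insertBy b x l = x :: l := by
  cases l with
  | nil => rfl
  | cons y t => simp [PySem.List.insertBy, h y (by simp)]

lemma insertBy_pairwise {α : Type} (k : α → String) (x : α) (ys : List α)
    (h : ys.Pairwise (fun a b => k a ≤ k b)) :
    (PySem.List.insertBy (fun a b => decide (k a < k b)) x ys).Pairwise (fun a b => k a ≤ k b) := by
  induction ys with
  | nil => simp [PySem.List.insertBy]
  | cons y t ih =>
    rcases List.pairwise_cons.mp h with ⟨hy, ht⟩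
    simp only [PySem.List.insertBy]
    by_cases hb : k x < k y
    · simp only [hb, decide_true, if_true]
      exact List.Pairwise.cons (by
          intro z hz
          rcases List.mem_cons.mp hz with rfl | hz
          · exact le_of_lt hb
          · exact le_of_lt (lt_of_lt_of_le hb (hy z hz)))
        (List.Pairwise.cons hy ht)
    · simp only [hb, decide_false]
      refine List.Pairwise.cons ?_ (ih ht)
      intro z hz
      rcases (PySem.List.mem_insertBy _ _ _ _).mp hz with hz | hz
      · subst hz; exact le_of_not_gt hb
      · exact hy z hz

lemma filter_insertBy {α : Type} (k : α → String) (q : α → Bool) (x : α) (ys : List α)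
    (h : ys.Pairwise (fun a b => k a ≤ k b)) :
    (PySem.List.insertBy (fun a b => decide (k a < k b)) x ys).filter q =
      if q x then PySem.List.insertBy (fun a b => decide (k a < k b)) x (ys.filter q) else ys.filter q := by
  induction ys with
  | nil =>
    by_cases hx : q x <;> simp [PySem.List.insertBy, List.filter, hx]
  | cons y t ih =>
    rcases List.pairwise_cons.mp h with ⟨hy, ht⟩
    simp only [PySem.List.insertBy]
    by_cases hb : k x < k y
    · simp only [hb, decide_true, if_true]
      by_cases hx : q x <;> by_cases hqy : q y
      · rw [List.filter_cons_of_pos hx, List.filter_cons_of_pos hqy, if_pos hx]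
        simp [PySem.List.insertBy, hb]
      · rw [List.filter_cons_of_pos hx, List.filter_cons_of_neg hqy, if_pos hx, insertBy_front]
        intro z hz
        exact decide_eq_true (lt_of_lt_of_le hb (hy z (List.mem_filter.mp hz).1))
      · simp [hx, hqy]
      · simp [hx, hqy]
    · simp only [hb, decide_false]
      have IH := ih ht
      by_cases hx : q x <;> by_cases hqy : q y <;>
        simp_all [PySem.List.insertBy]

lemma foldl_insertBy_filter (k : String × String → String) (q : String × String → Bool)
    (l acc : List (String × String)) (hacc : acc.Pairwise (fun a b => k a ≤ k b)) :
    (l.foldl (fun a x => PySem.List.insertBy (fun a b => decide (k a < k b)) x a) acc).filter q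
      = (l.filter q).foldl (fun a x => PySem.List.insertBy (fun a b => decide (k a < k b)) x a)
          (acc.filter q) := by
  induction l generalizing acc with
  | nil => rfl
  | cons p t ih =>
    simp only [List.foldl_cons, List.filter_cons]
    rw [ih _ (insertBy_pairwise k p acc hacc), filter_insertBy k q p acc hacc]
    by_cases hq : q p <;> simp [hq]

lemma sorted_filter (k : String × String → String) (q : String × String → Bool)
    (l : List (String × String)) :
    (PySem.List.sorted l k false).filter q = PySem.List.sorted (l.filter q) k false := by
  rw [PySem.List.sorted_eq_foldl_insertBy, PySem.List.sorted_eq_foldl_insertBy]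
  simpa using foldl_insertBy_filter k q l [] (by simp)

-- final per-key value equality
lemma value_eq (terms : List (String × String)) (c : String) :
    PySem.List.sorted ((terms.filter (fun p => pvFirstLetter p.1 == c)).map pvE) pvK2 false =
      ((PySem.List.sorted terms pvK1 false).filter (fun p => pvFirstLetter p.1 == c)).map pvE := by
  rw [sorted_map, k2_e, sorted_filter]

-- Set.update: absorption and membership
lemma update_absorb {α : Type} [BEq α] [LawfulBEq α] (s : PySem.Set α) (xs : List α)
    (h : ∀ x ∈ xs, x ∈ s) : PySem.Set.update s xs = s := by
  induction xs generalizing s with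
  | nil => rfl
  | cons x t ih =>
    simp only [PySem.Set.update, List.foldl_cons]
    rw [PySem.Set.add_of_mem (h x (by simp))]
    exact ih s (fun y hy => h y (by simp [hy]))

lemma mem_update_of_mem {α : Type} [BEq α] [LawfulBEq α] (s : PySem.Set α) (xs : List α) (x : α)
    (h : x ∈ s) : x ∈ PySem.Set.update s xs := by
  induction xs generalizing s with
  | nil => exact h
  | cons y t ih =>
    simp only [PySem.Set.update, List.foldl_cons]
    exact ih _ ((PySem.Set.mem_add _ _ _).mpr (Or.inl h))

lemma mem_update {α : Type} [BEq α] [LawfulBEq α] (s : PySem.Set α) (xs : List α) (x : α)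
    (h : x ∈ xs) : x ∈ PySem.Set.update s xs := by
  induction xs generalizing s with
  | nil => cases h
  | cons y t ih =>
    simp only [PySem.Set.update, List.foldl_cons]
    rcases List.mem_cons.mp h with rfl | hx
    · exact mem_update_of_mem _ _ _ ((PySem.Set.mem_add _ _ _).mpr (Or.inr rfl))
    · exact ih _ hx

-- ===== VERDICT (by name: the statement is the Claim_ definition above) =====
theorem organize_by_alphabet_spec : Claim_equal_organize_by_alphabet := by
  intro terms _ _
  show organize_by_alphabet terms = organize_by_alphabet_alt terms
  rw [portA_eq, portB_eq]
  have hndG : (terms.foldl pvStepG PySem.Dict.empty).keys.Nodup :=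
    nodup_keys_foldG _ _ (by simp)
  have hndR0 : (terms.foldl (fun d p => d.insert (pvFirstLetter p.1)
      ([] : List (List (String × String)))) PySem.Dict.empty).keys.Nodup :=
    PySem.Dict.nodup_keys_foldl_insert_key terms (fun p => pvFirstLetter p.1) _ _ (by simp)
  have hndB1 : ((PySem.List.sorted terms pvK1 false).foldl pvStepG
      (terms.foldl (fun d p => d.insert (pvFirstLetter p.1) ([] : List (List (String × String))))
        PySem.Dict.empty)).keys.Nodup := nodup_keys_foldG _ _ hndR0
  have hkR0 : (terms.foldl (fun d p => d.insert (pvFirstLetter p.1)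
        ([] : List (List (String × String)))) PySem.Dict.empty).keys
      = PySem.Set.update (PySem.Dict.empty : PySem.Dict String (List (List (String × String)))).keys (terms.map (fun p => pvFirstLetter p.1)) :=
    PySem.Dict.keys_foldl_insert_key terms (fun p => pvFirstLetter p.1) _ _
  have hkB1 : ((PySem.List.sorted terms pvK1 false).foldl pvStepG
      (terms.foldl (fun d p => d.insert (pvFirstLetter p.1) ([] : List (List (String × String))))
        PySem.Dict.empty)).keys
      = PySem.Set.update (PySem.Dict.empty : PySem.Dict String (List (List (String × String)))).keys (terms.map (fun p => pvFirstLetter p.1)) := by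
    rw [keys_foldG, hkR0]
    apply update_absorb
    intro x hx
    rcases List.mem_map.mp hx with ⟨p, hp, rfl⟩
    exact mem_update _ _ _
      (List.mem_map_of_mem ((PySem.List.mem_sorted terms pvK1 false p).mp hp))
  rw [PySem.Dict.items_eq_map_keys _ hndG ([] : List (List (String × String))),
    PySem.Dict.items_eq_map_keys _ hndB1 ([] : List (List (String × String))),
    List.map_map, keys_foldG, hkB1]
  simp only [PySem.Dict.keys_empty]
  apply List.map_congr_left
  intro c _
  simp only [Function.comp]
  refine Prod.ext rfl ?_
  show PySem.List.sorted ((terms.foldl pvStepG PySem.Dict.empty).getD c []) pvK2 false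
      = ((PySem.List.sorted terms pvK1 false).foldl pvStepG
          (terms.foldl (fun d p => d.insert (pvFirstLetter p.1) ([] : List (List (String × String))))
            PySem.Dict.empty)).getD c []
  rw [getD_foldG, getD_foldG,
    getD_seed terms _ c (by simp), PySem.Dict.getD_empty]
  simpa using value_eq terms c
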